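-- pv_equiv track=rewrite | github.com/xb4r7x/adventOfCode2022 | 6/day6.py | Solution
-- ===== SOURCE A (Python) =====
-- from collections import deque
--
-- def Solution(lines, length):
--     testSet = deque()
--     for i, c in enumerate(lines):
--         if len(testSet) == length:
--             uniq = set(testSet)
--             if len(uniq) == length:
--                 return i
--             testSet.popleft()
--         testSet.append(c)
-- ===== SOURCE B (Python) =====
-- def Solution(lines, length):
--     # O(n) sliding window: per-char counts plus a surplus counter instead of
--     # rebuilding a set of the last `length` chars at every position.
--     if length < 0:
--         return None
--     counts = {}
--     dups = 0  # number of surplus (duplicate) characters in the current window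
--     for i, c in enumerate(lines):
--         if i >= length:
--             if dups == 0:
--                 return i
--             old = lines[i - length]
--             counts[old] -= 1
--             if counts[old] >= 1:
--                 dups -= 1
--         counts[c] = counts.get(c, 0) + 1
--         if counts[c] >= 2:
--             dups += 1
--     return None
-- ===== Notes on version B (the rewrite author's own statement) =====
-- stated objective: faster
-- what changed: Replaces the deque plus a fresh set built at every position with an O(n) sliding window keeping a per-character count dict and a surplus-duplicate counter.
import Mathlib
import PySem

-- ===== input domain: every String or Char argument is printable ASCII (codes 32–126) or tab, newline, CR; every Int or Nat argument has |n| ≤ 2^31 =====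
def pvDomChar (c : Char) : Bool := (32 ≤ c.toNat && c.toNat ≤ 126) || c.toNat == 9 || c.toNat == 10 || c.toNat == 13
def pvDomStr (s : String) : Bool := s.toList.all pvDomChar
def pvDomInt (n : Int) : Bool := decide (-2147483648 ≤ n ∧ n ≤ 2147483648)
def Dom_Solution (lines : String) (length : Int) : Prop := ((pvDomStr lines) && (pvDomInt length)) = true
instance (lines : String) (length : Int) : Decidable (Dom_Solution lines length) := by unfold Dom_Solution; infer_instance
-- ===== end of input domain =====

-- B replaces A's deque + per-position set rebuild with an O(n) sliding window
-- keeping a per-character count dict and a surplus-duplicate counter (faster).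


-- ===== PORT A =====
-- the for-loop over enumerate(lines) with the deque `testSet`
def solutionLoopA (length : Int) : List Char → Int → List Char → Option Int
  | [], _, _ => none
  | c :: rest, i, testSet =>
    if (testSet.length : Int) = length then
      if ((PySem.Set.ofList testSet).length : Int) = length then some i
      else solutionLoopA length rest (i + 1) (testSet.drop 1 ++ [c])
    else solutionLoopA length rest (i + 1) (testSet ++ [c])

def Solution (lines : String) (length : Int) : Option Int :=
  solutionLoopA length lines.toList 0 []

-- ===== PORT B =====
-- counts[c] = counts.get(c, 0) + 1; if counts[c] >= 2: dups += 1
def addCharB (counts : PySem.Dict Char Int) (dups : Int) (c : Char) :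
    PySem.Dict Char Int × Int :=
  let counts := counts.insert c (counts.getD c 0 + 1)
  (counts, if 2 ≤ counts.getD c 0 then dups + 1 else dups)

def solutionLoopB (lines : List Char) (length : Int) :
    List Char → Int → PySem.Dict Char Int → Int → Option Int
  | [], _, _, _ => none
  | c :: rest, i, counts, dups =>
    if length ≤ i then
      if dups = 0 then some i
      else
        match PySem.List.pyGet? lines (i - length) with
        | none => none   -- lines[i - length]: IndexError (never reached)
        | some old =>
          let counts := counts.insert old (counts.getD old 0 - 1)
          let dups := if 1 ≤ counts.getD old 0 then dups - 1 else dups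
          let s := addCharB counts dups c
          solutionLoopB lines length rest (i + 1) s.1 s.2
    else
      let s := addCharB counts dups c
      solutionLoopB lines length rest (i + 1) s.1 s.2

def Solution_alt (lines : String) (length : Int) : Option Int :=
  if length < 0 then none
  else solutionLoopB lines.toList length lines.toList 0 (PySem.Dict.mk []) 0

-- ===== PRECONDITION & SPEC =====
def Spec_Solution (lines : String) (length : Int) (out : Option Int) : Prop := out = Solution_alt lines length
instance (lines : String) (length : Int) (out : Option Int) : Decidable (Spec_Solution lines length out) := by unfold Spec_Solution; infer_instance

-- ===== CLAIM (what is proved, stated in full; the proofs are below) =====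
def Claim_equal_Solution : Prop := ∀ (lines : String) (length : Int), Dom_Solution lines length → Spec_Solution lines length (Solution lines length)

-- ===== LEMMAS AND PROOFS =====

-- with a negative `length`, A's `len(testSet) == length` never fires: it returns None
lemma loopA_neg (length : Int) (hneg : length < 0) :
    ∀ (rest : List Char) (i : Int) (testSet : List Char),
      solutionLoopA length rest i testSet = none := by
  intro rest
  induction rest with
  | nil => intro i t; simp [solutionLoopA]
  | cons c rest ih =>
    intro i t
    have : ((t.length : Int) = length) = False := by
      simp only [eq_iff_iff, iff_false]; omega
    simp [solutionLoopA, this, ih]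

lemma ofList_length_eq_card (l : List Char) :
    (PySem.Set.ofList l).length = l.toFinset.card := by
  have h1 : (PySem.Set.ofList l).Nodup := PySem.Set.nodup_ofList l
  have h2 : l.toFinset = (PySem.Set.ofList l).toFinset := by
    ext x; simp [PySem.Set.mem_ofList]
  rw [h2, List.toFinset_card_of_nodup h1]

lemma addCharB_invariant (w : List Char) (counts : PySem.Dict Char Int) (dups : Int) (c : Char)
    (hc : ∀ c', counts.getD c' 0 = ((w.count c' : Int)))
    (hd : dups = (w.length : Int) - w.toFinset.card) :
    (∀ c', (addCharB counts dups c).1.getD c' 0 = (((w ++ [c]).count c' : Int))) ∧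
    (addCharB counts dups c).2 = ((w ++ [c]).length : Int) - (w ++ [c]).toFinset.card := by
  have htf : (w ++ [c]).toFinset = insert c w.toFinset := by ext x; simp
  have hget : ((counts.insert c (counts.getD c 0 + 1)).getD c 0) = (w.count c : Int) + 1 := by
    simp [hc]
  constructor
  · intro c'
    simp only [addCharB, PySem.Dict.getD_insert]
    by_cases h : c' = c
    · subst h; simp [hc, List.count_append]
    · rw [if_neg h, hc, List.count_append]
      have : List.count c' [c] = 0 := by
        simp [List.count_singleton]; intro h'; exact absurd h'.symm h
      simp [this]
  · simp only [addCharB, hget, htf, hd]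
    by_cases hm : c ∈ w
    · have h1 : 1 ≤ w.count c := List.count_pos_iff.mpr hm
      have h2 : insert c w.toFinset = w.toFinset := Finset.insert_eq_self.mpr (List.mem_toFinset.mpr hm)
      rw [if_pos (by omega), h2]
      simp; omega
    · have h1 : w.count c = 0 := List.count_eq_zero.mpr hm
      have h2 : (insert c w.toFinset).card = w.toFinset.card + 1 :=
        Finset.card_insert_of_notMem (by simp [hm])
      rw [if_neg (by omega), h2]
      simp

lemma loopAB (lines : List Char) (length : Int) (hL : 0 ≤ length) :
    ∀ (rest : List Char) (k : Nat) (testSet : List Char) (counts : PySem.Dict Char Int) (dups : Int),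
      lines.drop k = rest →
      testSet = (lines.take k).drop (k - length.toNat) →
      (∀ c', counts.getD c' 0 = ((testSet.count c' : Int))) →
      dups = (testSet.length : Int) - testSet.toFinset.card →
      solutionLoopA length rest (k : Int) testSet
        = solutionLoopB lines length rest (k : Int) counts dups := by
  intro rest
  induction rest with
  | nil => intro k t cs d _ _ _ _; simp [solutionLoopA, solutionLoopB]
  | cons c rest ih =>
    intro k testSet counts dups hdrop hts hcounts hdups
    have hLL : ((length.toNat : Int)) = length := Int.toNat_of_nonneg hL
    set L := length.toNat with hLdef
    have hk : k < lines.length := by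
      have := congrArg List.length hdrop
      simp [List.length_drop] at this
      omega
    have hc0 : c = lines[k] := by
      have h0 : (lines.drop k)[0]'(by rw [hdrop]; simp) = c := by
        simp [hdrop]
      rw [List.getElem_drop] at h0
      simpa using h0.symm
    have hdrop' : lines.drop (k + 1) = rest := by
      have : lines.drop (k + 1) = (lines.drop k).drop 1 := by
        rw [List.drop_drop]
      rw [this, hdrop]
      simp
    have htslen : testSet.length = k - (k - L) := by
      rw [hts]
      simp [List.length_drop, List.length_take]
      omega
    by_cases hkL : k < L
    · -- window still growing
      have hlen : testSet.length = k := by omega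
      have hcondA : ¬ ((testSet.length : Int) = length) := by
        rw [hlen]; omega
      have hcondB : ¬ (length ≤ (k : Int)) := by omega
      rw [solutionLoopA, solutionLoopB, if_neg hcondA, if_neg hcondB]
      have hts' : testSet ++ [c] = (lines.take (k+1)).drop ((k+1) - L) := by
        have h1 : (k+1) - L = 0 := by omega
        have h2 : k - L = 0 := by omega
        rw [h1, List.drop_zero, List.take_add_one, hts, h2, List.drop_zero]
        simp [hc0, List.getElem?_eq_getElem hk]
      obtain ⟨hc', hd'⟩ := addCharB_invariant testSet counts dups c hcounts hdups
      have := ih (k+1) (testSet ++ [c]) (addCharB counts dups c).1 (addCharB counts dups c).2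
        hdrop' hts' hc' hd'
      push_cast at this ⊢
      exact this
    · -- full window
      push Not at hkL
      have hlen : testSet.length = L := by omega
      have hcondA : (testSet.length : Int) = length := by rw [hlen]; omega
      have hcondB : length ≤ (k : Int) := by omega
      rw [solutionLoopA, solutionLoopB, if_pos hcondA, if_pos hcondB]
      have hcard : ((PySem.Set.ofList testSet).length : Int) = length ↔ dups = 0 := by
        rw [ofList_length_eq_card, hdups, hcondA.symm, hlen]
        constructor <;> intro h <;> omega
      by_cases huniq : dups = 0
      · rw [if_pos (hcard.mpr huniq), if_pos huniq]
      · rw [if_neg (fun h => huniq (hcard.mp h)), if_neg huniq]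
        -- window is full and has a duplicate: L ≥ 1
        have hcardlt : testSet.toFinset.card < L := by
          have hle : testSet.toFinset.card ≤ testSet.length := List.toFinset_card_le testSet
          rw [hlen] at hle
          rcases lt_or_eq_of_le hle with h | h
          · exact h
          · exact absurd (by omega : dups = 0) huniq
        have hL1 : 1 ≤ L := by omega
        -- testSet = old :: tail
        obtain ⟨old, tail, hcons⟩ : ∃ old tail, testSet = old :: tail := by
          cases testSet with
          | nil => simp at hlen; omega
          | cons a t => exact ⟨a, t, rfl⟩
        -- old = lines[k - L]
        have hkLn : k - L < lines.length := by omega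
        have hold : old = lines[k - L]'hkLn := by
          have h0 : testSet[0]? = some old := by rw [hcons]; rfl
          rw [hts, List.getElem?_drop] at h0
          have h1 : (List.take k lines)[k - L + 0]? = lines[k - L]? := by
            rw [List.getElem?_take_of_lt (by omega)]
            simp
          rw [h1, List.getElem?_eq_getElem hkLn] at h0
          exact (Option.some_inj.mp h0).symm
        have hget : PySem.List.pyGet? lines ((k : Int) - length) = some old := by
          have hidx : (k : Int) - length = ((k - L : Nat) : Int) := by
            rw [← hLL]; omega
          rw [hidx, PySem.List.pyGet?_natCast, hold]
          simp [List.getElem?_eq_getElem hkLn]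
        rw [hget]
        -- removal step invariants
        have hcounts1 : ∀ c', (counts.insert old (counts.getD old 0 - 1)).getD c' 0
            = ((tail.count c' : Int)) := by
          intro c'
          rw [PySem.Dict.getD_insert]
          by_cases h : c' = old
          · subst h; rw [if_pos rfl, hcounts, hcons]; simp
          · rw [if_neg h, hcounts, hcons, List.count_cons]
            simp
            intro h'; exact absurd h'.symm h
        have hmemiff : (1 : Int) ≤ (counts.insert old (counts.getD old 0 - 1)).getD old 0 ↔ old ∈ tail := by
          rw [hcounts1]
          constructor
          · intro h; exact List.count_pos_iff.mp (by exact_mod_cast h)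
          · intro h; exact_mod_cast List.count_pos_iff.mpr h
        have hdups1 : (if (1:Int) ≤ (counts.insert old (counts.getD old 0 - 1)).getD old 0
              then dups - 1 else dups)
            = ((tail.length : Int) - tail.toFinset.card) := by
          have htf : testSet.toFinset = insert old tail.toFinset := by rw [hcons]; simp
          by_cases hm : old ∈ tail
          · rw [if_pos (hmemiff.mpr hm)]
            have h2 : insert old tail.toFinset = tail.toFinset :=
              Finset.insert_eq_self.mpr (List.mem_toFinset.mpr hm)
            rw [hdups, htf, h2, hcons]; simp; omega
          · rw [if_neg (fun h => hm (hmemiff.mp h))]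
            have h2 : (insert old tail.toFinset).card = tail.toFinset.card + 1 :=
              Finset.card_insert_of_notMem (by simp [hm])
            rw [hdups, htf, h2, hcons]; simp
        -- state after removal + append
        have hts' : tail ++ [c] = (lines.take (k+1)).drop ((k+1) - L) := by
          have h1 : (k+1) - L ≤ k := by omega
          have htail : tail = (lines.take k).drop ((k+1) - L) := by
            have : tail = testSet.drop 1 := by rw [hcons]; simp
            rw [this, hts, List.drop_drop]
            congr 1
            omega
          rw [List.take_add_one, List.drop_append_of_le_length (by simp [List.length_take]; omega),
            ← htail]
          simp [hc0, List.getElem?_eq_getElem hk]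
        obtain ⟨hc', hd'⟩ := addCharB_invariant tail
          (counts.insert old (counts.getD old 0 - 1))
          (if (1:Int) ≤ (counts.insert old (counts.getD old 0 - 1)).getD old 0 then dups - 1 else dups)
          c hcounts1 hdups1
        have hrec := ih (k+1) (tail ++ [c]) _ _ hdrop' hts' hc' hd'
        push_cast at hrec
        simpa [hcons] using hrec

-- ===== VERDICT (by name: the statement is the Claim_ definition above) =====
theorem Solution_spec : Claim_equal_Solution := by
  intro lines length _
  unfold Spec_Solution Solution Solution_alt
  by_cases hneg : length < 0
  · simp [hneg, loopA_neg length hneg]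
  · push Not at hneg
    simp only [if_neg (not_lt.mpr hneg)]
    have := loopAB lines.toList length hneg lines.toList 0 [] (PySem.Dict.mk []) 0
      (by simp) (by simp) (by intro c'; simp [PySem.Dict.getD, PySem.Dict.get?]) (by simp)
    simpa using this
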